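-- pv_equiv track=rewrite | github.com/rahul-sg/HondaResearchLabs_DSC180A-Eval-Systems-Of-NextGen-LLMs | eval_baseline.py | _slides_to_str
-- ===== SOURCE A (Python) =====
-- from typing import List, Dict, Any, Tuple, Optional
--
-- def estimate_tokens(text: str) -> int:
--     return max(1, int(len(text) / 4))
--
-- def chunk_slides_by_tokens(
--     slides: List[Dict],
--     max_tokens: int = 1500,
--     text_key: str = "content"
-- ) -> List[List[Dict]]:
--     # Chunk slides so each chunk stays under ~max_tokens (approx).
--
--     chunks: List[List[Dict]] = []
--     current, cur_tok = [], 0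
--     for s in slides:
--         t = estimate_tokens(str(s.get(text_key, "")))
--         if current and cur_tok + t > max_tokens:
--             chunks.append(current)
--             current, cur_tok = [], 0
--         current.append(s)
--         cur_tok += t
--     if current:
--         chunks.append(current)
--     return chunks
--
-- def _slides_to_str(
--     slides: List[Dict],
--     max_chunks: int = 3,
--     max_tokens: int = 1500
-- ) -> str:
--     # Render slides into a text block for the judge,
--     chunks = chunk_slides_by_tokens(slides, max_tokens=max_tokens)
--     chunks = chunks[:max_chunks]
--     out = []
--     for ci, ch in enumerate(chunks, 1):
--         for i, s in enumerate(ch, 1):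
--             out.append(f"[Chunk {ci} • Slide {i}] {s.get('title','')}\n{s.get('content','')}")
--     return "\n\n".join(out)
-- ===== SOURCE B (Python) =====
-- def _slides_to_str(slides, max_chunks=3, max_tokens=1500):
--     # One pass computes only the chunk SIZES (no intermediate list-of-lists);
--     # rendering then walks the slide stream directly, consuming `rest`.
--     sizes = []
--     cur_n = 0
--     cur_tok = 0
--     for s in slides:
--         t = max(1, len(str(s.get("content", ""))) // 4)
--         if cur_n and cur_tok + t > max_tokens:
--             sizes.append(cur_n)
--             cur_n = 0
--             cur_tok = 0
--         cur_n += 1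
--         cur_tok += t
--     if cur_n:
--         sizes.append(cur_n)
--     parts = []
--     rest = slides
--     for ci, n in enumerate(sizes[:max_chunks], 1):
--         for i in range(1, n + 1):
--             s, rest = rest[0], rest[1:]
--             parts.append(f"[Chunk {ci} \u2022 Slide {i}] {s.get('title','')}\n{s.get('content','')}")
--     return "\n\n".join(parts)
-- ===== Notes on version B (the rewrite author's own statement) =====
-- stated objective: alternative
-- what changed: B never builds the intermediate list-of-lists of slides: one pass records only the chunk sizes, and rendering walks the original slide stream, consuming it while counting chunk/slide indices.
import Mathlib
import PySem

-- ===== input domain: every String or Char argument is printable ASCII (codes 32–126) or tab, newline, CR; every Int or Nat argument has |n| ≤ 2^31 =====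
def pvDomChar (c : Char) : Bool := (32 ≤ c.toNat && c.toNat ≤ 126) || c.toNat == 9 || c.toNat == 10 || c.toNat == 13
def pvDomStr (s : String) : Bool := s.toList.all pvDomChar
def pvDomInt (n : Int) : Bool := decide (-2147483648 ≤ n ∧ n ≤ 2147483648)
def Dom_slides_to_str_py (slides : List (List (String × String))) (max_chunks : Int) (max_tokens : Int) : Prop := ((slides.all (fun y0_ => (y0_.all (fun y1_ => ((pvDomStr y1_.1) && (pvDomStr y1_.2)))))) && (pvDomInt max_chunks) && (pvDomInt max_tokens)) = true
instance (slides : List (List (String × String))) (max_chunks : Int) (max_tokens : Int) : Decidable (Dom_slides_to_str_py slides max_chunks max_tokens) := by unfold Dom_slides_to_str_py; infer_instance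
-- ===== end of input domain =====

-- B replaces A's intermediate list-of-lists of slides by a single pass recording chunk SIZES,
-- rendering by consuming the original slide stream (objective: alternative decomposition, same cost).

-- shared helpers: both Pythons compute the same token estimate and the same f-string line
-- estimate_tokens: int(len(text)/4) = len // 4 exactly, since len ≥ 0 (floordiv = truncation here)
def pvTok (s : List (String × String)) : Int :=
  max 1 (PySem.Int.floordiv (PySem.Str.len (PySem.Dict.getD (PySem.Dict.mk s) "content" "")) 4)

def pvLine (ci i : Int) (s : List (String × String)) : String :=
  "[Chunk " ++ PySem.Int.toStr ci ++ " • Slide " ++ PySem.Int.toStr i ++ "] "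
    ++ PySem.Dict.getD (PySem.Dict.mk s) "title" "" ++ "\n"
    ++ PySem.Dict.getD (PySem.Dict.mk s) "content" ""

-- ===== PORT A =====
-- chunk_slides_by_tokens: fold with state (chunks, current, cur_tok)
def pvChunkSlides (slides : List (List (String × String))) (max_tokens : Int) :
    List (List (List (String × String))) :=
  let st := slides.foldl
    (fun st s =>
      let t := pvTok s
      if st.2.1 ≠ ([] : List (List (String × String))) ∧ max_tokens < st.2.2 + t then
        (st.1 ++ [st.2.1], ([s], t))
      else
        (st.1, (st.2.1 ++ [s], st.2.2 + t)))
    (([], [], 0) : List (List (List (String × String))) × List (List (String × String)) × Int)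
  if st.2.1 ≠ [] then st.1 ++ [st.2.1] else st.1

def slides_to_str_py (slides : List (List (String × String))) (max_chunks : Int) (max_tokens : Int) : String :=
  let chunks := PySem.List.slice (pvChunkSlides slides max_tokens) none (some max_chunks)
  let out := (PySem.List.enumerate chunks 1).foldl
    (fun out p =>
      (PySem.List.enumerate p.2 1).foldl (fun out q => out ++ [pvLine p.1 q.1 q.2]) out)
    ([] : List String)
  PySem.Str.join "\n\n" out

-- ===== PORT B =====
def slides_to_str_py_alt (slides : List (List (String × String))) (max_chunks : Int) (max_tokens : Int) : String :=
  -- pass 1: chunk sizes only, state (sizes, cur_n, cur_tok)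
  let st := slides.foldl
    (fun st s =>
      let t := pvTok s
      if st.2.1 ≠ (0 : Int) ∧ max_tokens < st.2.2 + t then
        (st.1 ++ [st.2.1], (1, t))
      else
        (st.1, (st.2.1 + 1, st.2.2 + t)))
    (([], 0, 0) : List Int × Int × Int)
  let sizes := if st.2.1 ≠ 0 then st.1 ++ [st.2.1] else st.1
  -- pass 2: state (parts, rest); rest[0] is ported with a default — rest is never empty when read
  let res := (PySem.List.enumerate (PySem.List.slice sizes none (some max_chunks)) 1).foldl
    (fun pr p =>
      (PySem.List.pyRange 1 (p.2 + 1) 1).foldl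
        (fun pr i =>
          (pr.1 ++ [pvLine p.1 i (PySem.List.pyGetD pr.2 0 [])],
           PySem.List.slice pr.2 (some 1) none))
        pr)
    (([], slides) : List String × List (List (String × String)))
  PySem.Str.join "\n\n" res.1

-- ===== PRECONDITION & SPEC =====
def Spec_slides_to_str_py (slides : List (List (String × String))) (max_chunks : Int) (max_tokens : Int) (out : String) : Prop := out = slides_to_str_py_alt slides max_chunks max_tokens
instance (slides : List (List (String × String))) (max_chunks : Int) (max_tokens : Int) (out : String) : Decidable (Spec_slides_to_str_py slides max_chunks max_tokens out) := by unfold Spec_slides_to_str_py; infer_instance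

-- ===== CLAIM (what is proved, stated in full; the proofs are below) =====
def Claim_equal_slides_to_str_py : Prop := ∀ (slides : List (List (String × String))) (max_chunks : Int) (max_tokens : Int), Dom_slides_to_str_py slides max_chunks max_tokens → Spec_slides_to_str_py slides max_chunks max_tokens (slides_to_str_py slides max_chunks max_tokens)

-- ===== LEMMAS AND PROOFS =====

-- B's size fold mirrors A's chunk fold through (map length, length, id)
theorem pv_fold_sizes (slides : List (List (String × String))) (max_tokens : Int)
    (chunks : List (List (List (String × String)))) (current : List (List (String × String))) (tok : Int) :
    slides.foldl
      (fun st s =>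
        let t := pvTok s
        if st.2.1 ≠ (0 : Int) ∧ max_tokens < st.2.2 + t then
          (st.1 ++ [st.2.1], (1, t))
        else
          (st.1, (st.2.1 + 1, st.2.2 + t)))
      ((chunks.map (fun c => (c.length : Int)), (current.length : Int), tok))
    = (let st := slides.foldl
        (fun st s =>
          let t := pvTok s
          if st.2.1 ≠ ([] : List (List (String × String))) ∧ max_tokens < st.2.2 + t then
            (st.1 ++ [st.2.1], ([s], t))
          else
            (st.1, (st.2.1 ++ [s], st.2.2 + t)))
        ((chunks, current, tok));
       (st.1.map (fun c => (c.length : Int)), (st.2.1.length : Int), st.2.2)) := by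
  induction slides generalizing chunks current tok with
  | nil => simp
  | cons s rest ih =>
    simp only [List.foldl_cons]
    by_cases h : current ≠ ([] : List (List (String × String))) ∧ max_tokens < tok + pvTok s
    · have h' : ((current.length : Int) ≠ 0 ∧ max_tokens < tok + pvTok s) := by
        refine ⟨?_, h.2⟩
        simpa using h.1
      rw [if_pos h, if_pos h']
      simpa using ih (chunks ++ [current]) [s] (pvTok s)
    · have h' : ¬ ((current.length : Int) ≠ 0 ∧ max_tokens < tok + pvTok s) := by
        intro hc
        exact h ⟨by simpa using hc.1, hc.2⟩
      rw [if_neg h, if_neg h']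
      simpa using ih chunks (current ++ [s]) (tok + pvTok s)

-- A's chunk fold never loses a slide: flatten chunks ++ current grows by the consumed slides
theorem pv_fold_flatten (slides : List (List (String × String))) (max_tokens : Int)
    (chunks : List (List (List (String × String)))) (current : List (List (String × String))) (tok : Int) :
    (let st := slides.foldl
        (fun st s =>
          let t := pvTok s
          if st.2.1 ≠ ([] : List (List (String × String))) ∧ max_tokens < st.2.2 + t then
            (st.1 ++ [st.2.1], ([s], t))
          else
            (st.1, (st.2.1 ++ [s], st.2.2 + t)))
        ((chunks, current, tok));
     st.1.flatten ++ st.2.1) = chunks.flatten ++ current ++ slides := by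
  induction slides generalizing chunks current tok with
  | nil => simp
  | cons s rest ih =>
    simp only [List.foldl_cons]
    by_cases h : current ≠ ([] : List (List (String × String))) ∧ max_tokens < tok + pvTok s
    · rw [if_pos h]
      have := ih (chunks ++ [current]) [s] (pvTok s)
      simp only [List.flatten_append, List.flatten_cons, List.flatten_nil, List.append_nil] at this ⊢
      rw [this]; simp
    · rw [if_neg h]
      have := ih chunks (current ++ [s]) (tok + pvTok s)
      rw [this]; simp

-- slicing a prefix commutes with map
theorem pv_slice_map {α β : Type} (f : α → β) (xs : List α) (b : Int) :
    PySem.List.slice (xs.map f) none (some b) = (PySem.List.slice xs none (some b)).map f := by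
  rcases (by omega : 0 ≤ b ∨ b < 0) with hb | hb
  · rw [PySem.List.slice_to _ hb, PySem.List.slice_to _ hb, List.map_take]
  · obtain ⟨k, hk0, rfl⟩ : ∃ k : Nat, 0 < k ∧ b = -(k : Int) :=
      ⟨(-b).toNat, by omega, by omega⟩
    rw [PySem.List.slice_to_neg_natCast (xs.map f) k hk0, PySem.List.slice_to_neg_natCast xs k hk0,
      List.map_take, List.length_map]

-- inner loop of B: renders one chunk of known size, consuming exactly it from the stream
theorem pv_inner (ci : Int) (ch : List (List (String × String)))
    (extra : List (List (String × String))) (i0 : Int) (parts : List String) :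
    (PySem.List.pyRange i0 (i0 + (ch.length : Int)) 1).foldl
      (fun pr i =>
        (pr.1 ++ [pvLine ci i (PySem.List.pyGetD pr.2 0 [])],
         PySem.List.slice pr.2 (some 1) none))
      ((parts, ch ++ extra))
    = (parts ++ (PySem.List.enumerate ch i0).map (fun q => pvLine ci q.1 q.2), extra) := by
  induction ch generalizing i0 parts with
  | nil =>
    have hnil : PySem.List.pyRange i0 (i0 + (([] : List (List (String × String))).length : Int)) 1 = [] := by
      apply List.eq_nil_of_length_eq_zero
      rw [PySem.List.length_pyRange_one]
      simp
    rw [hnil]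
    simp [PySem.List.enumerate_nil]
  | cons s t ih =>
    have hlt : i0 < i0 + ((s :: t).length : Int) := by
      have : (0:Int) < ((s :: t).length : Int) := by simp
      omega
    rw [PySem.List.pyRange_one_cons hlt]
    simp only [List.foldl_cons]
    have h1 : PySem.List.pyGetD ((s :: t) ++ extra) 0 ([] : List (String × String)) = s := by
      simp
    have h2 : PySem.List.slice ((s :: t) ++ extra) (some 1) none = t ++ extra := by
      simpa using PySem.List.slice_from_natCast (xs := (s :: t) ++ extra) (a := 1)
    rw [h1, h2]
    have harith : i0 + ((s :: t).length : Int) = (i0 + 1) + (t.length : Int) := by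
      simp; omega
    rw [harith, ih (i0 + 1) (parts ++ [pvLine ci i0 s])]
    simp [PySem.List.enumerate_cons]

-- outer loop: B over sizes of chunks, consuming the flattened chunks, equals A's nested rendering
theorem pv_outer (chunks : List (List (List (String × String))))
    (extra : List (List (String × String))) (c0 : Int) (parts : List String) :
    (PySem.List.enumerate (chunks.map (fun c => (c.length : Int))) c0).foldl
      (fun pr p =>
        (PySem.List.pyRange 1 (p.2 + 1) 1).foldl
          (fun pr i =>
            (pr.1 ++ [pvLine p.1 i (PySem.List.pyGetD pr.2 0 [])],
             PySem.List.slice pr.2 (some 1) none))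
          pr)
      ((parts, chunks.flatten ++ extra))
    = ((PySem.List.enumerate chunks c0).foldl
        (fun out p =>
          (PySem.List.enumerate p.2 1).foldl (fun out q => out ++ [pvLine p.1 q.1 q.2]) out)
        parts, extra) := by
  induction chunks generalizing c0 parts with
  | nil => simp [PySem.List.enumerate_nil]
  | cons ch chs ih =>
    simp only [List.map_cons, PySem.List.enumerate_cons, List.foldl_cons, List.flatten_cons]
    have h1 : (1 : Int) + (ch.length : Int) = (ch.length : Int) + 1 := by ring
    have := pv_inner c0 ch (chs.flatten ++ extra) 1 parts
    rw [h1] at this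
    rw [List.append_assoc, this, ih (c0 + 1), PySem.List.foldl_append_singleton_eq_map]

-- a prefix slice is a take
theorem pv_slice_eq_take {α : Type} (xs : List α) (b : Int) :
    ∃ k : Nat, PySem.List.slice xs none (some b) = xs.take k := by
  rcases (by omega : 0 ≤ b ∨ b < 0) with hb | hb
  · exact ⟨b.toNat, PySem.List.slice_to _ hb⟩
  · obtain ⟨k, hk0, rfl⟩ : ∃ k : Nat, 0 < k ∧ b = -(k : Int) :=
      ⟨(-b).toNat, by omega, by omega⟩
    exact ⟨xs.length - k, PySem.List.slice_to_neg_natCast xs k hk0⟩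

-- ===== VERDICT (by name: the statement is the Claim_ definition above) =====
set_option maxHeartbeats 1000000 in
theorem slides_to_str_py_spec : Claim_equal_slides_to_str_py := by
  intro slides max_chunks max_tokens _
  unfold Spec_slides_to_str_py slides_to_str_py slides_to_str_py_alt pvChunkSlides
  dsimp only
  generalize hfold : List.foldl
      (fun (st : List (List (List (String × String))) × List (List (String × String)) × Int) s =>
        if st.2.1 ≠ [] ∧ max_tokens < st.2.2 + pvTok s then (st.1 ++ [st.2.1], [s], pvTok s)
        else (st.1, st.2.1 ++ [s], st.2.2 + pvTok s)) ([], [], 0) slides = st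
  have hs := pv_fold_sizes slides max_tokens [] [] 0
  dsimp only at hs
  simp only [List.map_nil, List.length_nil, Nat.cast_zero] at hs
  rw [hfold] at hs
  rw [hs]
  have hflat := pv_fold_flatten slides max_tokens [] [] 0
  dsimp only at hflat
  rw [hfold] at hflat
  simp only [List.flatten_nil, List.nil_append] at hflat
  by_cases hcur : st.2.1 = ([] : List (List (String × String)))
  · have hcur' : ¬ ((st.2.1.length : Int) ≠ 0) := by simp [hcur]
    rw [if_neg hcur', if_neg (by simp [hcur])]
    rw [pv_slice_map]
    obtain ⟨k, hk⟩ := pv_slice_eq_take st.1 max_chunks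
    rw [hk]
    have hflat' : st.1.flatten = slides := by simpa [hcur] using hflat
    have hsplit : slides = (st.1.take k).flatten ++ (st.1.drop k).flatten := by
      rw [← List.flatten_append, List.take_append_drop, hflat']
    conv_rhs => rw [hsplit]
    rw [pv_outer]
  · have hcur' : ((st.2.1.length : Int) ≠ 0) := by simpa using hcur
    rw [if_pos hcur', if_pos hcur]
    have hmap : st.1.map (fun c => (c.length : Int)) ++ [(st.2.1.length : Int)]
        = (st.1 ++ [st.2.1]).map (fun c => (c.length : Int)) := by simp
    rw [hmap, pv_slice_map]
    obtain ⟨k, hk⟩ := pv_slice_eq_take (st.1 ++ [st.2.1]) max_chunks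
    rw [hk]
    have hflat' : (st.1 ++ [st.2.1]).flatten = slides := by simpa using hflat
    have hsplit : slides = ((st.1 ++ [st.2.1]).take k).flatten
        ++ ((st.1 ++ [st.2.1]).drop k).flatten := by
      rw [← List.flatten_append, List.take_append_drop, hflat']
    conv_rhs => rw [hsplit]
    rw [pv_outer]
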